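-- pv_equiv track=rewrite | github.com/mort13/Rock-Capture-CNN | cnn/dataset.py | parse_char_classes
-- ===== SOURCE A (Python) =====
-- def parse_char_classes(chars_str: str) -> list[str]:
--     """
--     Parse character class string into tokens, handling multi-character tokens.
--
--     Multi-character tokens:
--     - "empty": represents empty fields
--     """
--     multi_char_tokens = {"empty"}
--     tokens = []
--     i = 0
--     while i < len(chars_str):
--         matched = False
--         for token in multi_char_tokens:
--             if chars_str[i:i+len(token)] == token:
--                 tokens.append(token)
--                 i += len(token)
--                 matched = True
--                 break
--         if not matched:
--             tokens.append(chars_str[i])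
--             i += 1
--     return tokens
-- ===== SOURCE B (Python) =====
-- import re
--
-- def parse_char_classes(chars_str: str) -> list[str]:
--     # Regex scan: at each position prefer the literal 'empty', otherwise one char.
--     return re.findall(r'empty|.', chars_str, re.DOTALL)
-- ===== Notes on version B (the rewrite author's own statement) =====
-- stated objective: idiomatic
-- what changed: Replaced the hand-written index/while loop with set iteration and slicing by a single regex findall ('empty|.', DOTALL) whose alternation performs the same greedy left-to-right tokenization.
import Mathlib
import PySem

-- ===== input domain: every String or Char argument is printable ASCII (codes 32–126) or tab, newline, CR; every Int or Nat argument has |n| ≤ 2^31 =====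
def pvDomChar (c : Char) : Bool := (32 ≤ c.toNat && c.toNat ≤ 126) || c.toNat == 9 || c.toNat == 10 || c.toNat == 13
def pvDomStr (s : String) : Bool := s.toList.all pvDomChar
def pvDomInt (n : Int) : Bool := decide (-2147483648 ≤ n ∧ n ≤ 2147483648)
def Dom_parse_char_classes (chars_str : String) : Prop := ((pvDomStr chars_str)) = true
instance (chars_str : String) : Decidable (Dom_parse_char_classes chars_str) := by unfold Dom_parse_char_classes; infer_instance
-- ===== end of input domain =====

-- B replaces A's index/while loop (with its inner scan over the token set) by a regex
-- findall r'empty|.' (DOTALL); objective: idiomatic, same asymptotic cost.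

-- ===== PORT A =====
-- A's while loop: index i, for each position try the (single) multi-char token via a
-- slice comparison, else emit the single character.  The for-loop over the one-element
-- set {"empty"} is transcribed as the single slice test with the same matched/append/advance effect.
def parseA_go (cs : List Char) (i : Nat) (tokens : List String) : List String :=
  if h : i < cs.length then
    -- for token in {"empty"}: if chars_str[i:i+len(token)] == token  (matched → append, i += 5)
    if PySem.List.slice cs (some (i : Int)) (some ((i : Int) + 5)) = "empty".toList then
      parseA_go cs (i + 5) (tokens ++ ["empty"])
    else
      -- not matched: tokens.append(chars_str[i]); i += 1
      parseA_go cs (i + 1) (tokens ++ [String.ofList [cs[i]]])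
  else tokens
termination_by cs.length - i
decreasing_by all_goals omega

def parse_char_classes (chars_str : String) : List String :=
  parseA_go chars_str.toList 0 []

-- ===== PORT B =====
-- The regex engine's left-to-right scan with alternation 'empty|.': at the current
-- position prefer the literal 'empty', otherwise consume exactly one character.
def parseB_go : List Char → List String
  | [] => []
  | c :: rest =>
    if (c :: rest).take 5 = "empty".toList then
      "empty" :: parseB_go ((c :: rest).drop 5)
    else
      String.ofList [c] :: parseB_go rest
termination_by cs => cs.length
decreasing_by all_goals simp

def parse_char_classes_alt (chars_str : String) : List String :=
  parseB_go chars_str.toList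

-- ===== PRECONDITION & SPEC =====
def Spec_parse_char_classes (chars_str : String) (out : List String) : Prop := out = parse_char_classes_alt chars_str
instance (chars_str : String) (out : List String) : Decidable (Spec_parse_char_classes chars_str out) := by unfold Spec_parse_char_classes; infer_instance

-- ===== CLAIM (what is proved, stated in full; the proofs are below) =====
def Claim_equal_parse_char_classes : Prop := ∀ (chars_str : String), Dom_parse_char_classes chars_str → Spec_parse_char_classes chars_str (parse_char_classes chars_str)

-- ===== LEMMAS AND PROOFS =====

lemma drop_cons_of_lt (cs : List Char) (i : Nat) (h : i < cs.length) :
    ∃ c rest, cs.drop i = c :: rest := by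
  rcases hcs : cs.drop i with _ | ⟨c, rest⟩
  · exfalso
    have := List.length_drop (l := cs) (i := i)
    rw [hcs] at this; simp at this; omega
  · exact ⟨c, rest, rfl⟩

lemma parseA_go_eq_aux (n : Nat) (cs : List Char) (i : Nat) (tokens : List String)
    (hn : cs.length - i ≤ n) :
    parseA_go cs i tokens = tokens ++ parseB_go (cs.drop i) := by
  induction n generalizing i tokens with
  | zero =>
      rw [parseA_go]
      have h : ¬ i < cs.length := by omega
      simp only [h]
      have : cs.drop i = [] := List.drop_eq_nil_of_le (by omega)
      rw [this, parseB_go]; simp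
  | succ n ih =>
      rw [parseA_go]
      by_cases h : i < cs.length
      · obtain ⟨c, rest, hd⟩ := drop_cons_of_lt cs i h
        have hslice : PySem.List.slice cs (some (i : Int)) (some ((i : Int) + 5)) = (cs.drop i).take 5 := by
          have := PySem.List.slice_natCast_add (xs := cs) (j := i) (n := 5)
          simpa using this
        by_cases hm : PySem.List.slice cs (some (i : Int)) (some ((i : Int) + 5)) = "empty".toList
        · simp only [h, dif_pos, hm, if_pos]
          rw [ih (i + 5) (tokens ++ ["empty"]) (by omega)]
          rw [hslice, hd] at hm
          rw [hd, parseB_go]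
          simp only [hm, if_pos]
          have h5 : (c :: rest).drop 5 = cs.drop (i + 5) := by
            rw [← hd, List.drop_drop]
          rw [h5]; simp
        · simp only [h, dif_pos, hm]
          rw [ih (i + 1) (tokens ++ [String.ofList [cs[i]]]) (by omega)]
          rw [hslice, hd] at hm
          have hc : cs[i] = c := by
            have h0 : cs[i]? = some c := by
              rw [← List.head?_drop, hd]; rfl
            rw [List.getElem?_eq_getElem h] at h0
            exact Option.some.inj h0
          have hrest : rest = cs.drop (i + 1) := by
            have h1 : (cs.drop i).drop 1 = cs.drop (i + 1) := by
              rw [List.drop_drop]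
            rw [hd] at h1; simpa using h1
          rw [hd, parseB_go]
          simp only [hm]
          rw [hc, ← hrest]
          simp
      · simp only [h]
        have : cs.drop i = [] := List.drop_eq_nil_of_le (by omega)
        rw [this, parseB_go]; simp

-- ===== VERDICT (by name: the statement is the Claim_ definition above) =====
theorem parse_char_classes_spec : Claim_equal_parse_char_classes := by
  intro s _
  unfold Spec_parse_char_classes parse_char_classes parse_char_classes_alt
  simpa using parseA_go_eq_aux s.toList.length s.toList 0 [] (by omega)
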